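/- GENERATED by farm/mkstatement.py from design/units.tsv (unit `start_decoder.2b`) and the assertions of Vorbis/Spec/StartDecoder2.lean — do not edit.
   THE STATEMENT of the proof unit `start_decoder.2b`: segment 2b of `start_decoder` (33 instructions; entries 0x113a46;
   exits 0x113b22,0x113c0c,0x113ad1,0x113b15,0x113b7a,0x113b89,0x113b98,0x113baa,0x113bfa; ranges 0x113a46-0x113acc + 0x113bee-0x113bf8)
   takes each of its entry assertions to one of its exit assertions (`Vorbis.Spec.StartDecoder.Seg2b`), given the contracts of its callees.
   What the names mean: Vorbis/Spec/Basic.lean (the shared hypotheses), Vorbis/Spec/StartDecoder2.lean (the assertions). The theorem to prove: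
   `theorem start_decoder_2b_ok : Vorbis.Spec.start_decoder_2b.Statement`. -/
import Vorbis.Spec.Reader
import Vorbis.Spec.StartDecoder2
namespace Vorbis.Spec.start_decoder_2b
open X86 X86.User Asan

/-- The statement of unit `start_decoder.2b`. -/
def Statement : Prop :=
  ∀ (Lay : Layout) (_hLay : Lay.hi = 0x1000000) (μ : Microarch) (_hμ : UserX.MicroOK μ) (u₀ : State)
    (_hcode : HasCodeNat Lay u₀ Vorbis.L.start_decoder.entry Vorbis.Code.code_start_decoder.nat Vorbis.L.start_decoder.size)
    (_h_asan_load1_noabort : Asan.SmallCheck Lay μ Vorbis.WayInv (Vorbis.CodeOK u₀) [.rax, .rdx] 1 Vorbis.L.__asan_load1_noabort.entry)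
    (_h_asan_load4_noabort : Asan.SmallCheck Lay μ Vorbis.WayInv (Vorbis.CodeOK u₀) [.rax, .rcx, .rdx] 4 Vorbis.L.__asan_load4_noabort.entry)
    (_h_getn : ∀ (others : List Obj) (frames : List (Nat × FrameLayout)) (Blk : Block → Prop) (len : Nat), Calls Lay μ Vorbis.WayInv (Vorbis.conv u₀) Vorbis.L.getn.entry (Vorbis.Spec.getn.spec others frames Blk len))
    (_h_get8 : ∀ (others : List Obj) (frames : List (Nat × FrameLayout)) (Blk : Block → Prop) (len : Nat), Calls Lay μ Vorbis.WayInv (Vorbis.conv u₀) Vorbis.L.get8.entry (Vorbis.Spec.get8.spec others frames Blk len)),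
    Vorbis.Spec.StartDecoder.Seg2b Lay μ u₀

end Vorbis.Spec.start_decoder_2b
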